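-- pv_equiv track=rewrite | github.com/aeronauty/text-extraction | strip_text.py | ordered_lines_by_column
-- ===== SOURCE A (Python) =====
-- def ordered_lines_by_column(column_word_list):
--     """
--     Sort by (column_index, top, left) and group into lines (same column, similar top).
--     Returns list of lines, each line is a list of words to join with space.
--     """
--     if not column_word_list:
--         return []
--     sorted_list = sorted(column_word_list, key=lambda x: (x[0], x[1], x[2]))
--     lines = []
--     current_line = []
--     current_col = None
--     current_top = None
--     line_tolerance = 5  # pixels
--
--     for col, top, left, text in sorted_list:
--         if current_col is not None and (col != current_col or (current_top is not None and abs(top - current_top) > line_tolerance)):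
--             if current_line:
--                 lines.append(" ".join(current_line))
--                 current_line = []
--         current_col = col
--         current_top = top
--         current_line.append(text)
--
--     if current_line:
--         lines.append(" ".join(current_line))
--     return lines
-- ===== SOURCE B (Python) =====
-- def ordered_lines_by_column(column_word_list):
--     """
--     Same result as A via a nested two-stage traversal: sort by (col, top, left),
--     scan column blocks by index, and within each block chunk on top-gaps > 5
--     relative to the immediately preceding word.
--     """
--     words = sorted(column_word_list, key=lambda w: (w[0], w[1], w[2]))
--     lines = []
--     i = 0
--     n = len(words)
--     while i < n:
--         col = words[i][0]
--         j = i + 1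
--         while j < n and words[j][0] == col:
--             j += 1
--         # words[i:j] is one column block
--         chunk = [words[i][3]]
--         prev_top = words[i][1]
--         for k in range(i + 1, j):
--             top = words[k][1]
--             if abs(top - prev_top) > 5:
--                 lines.append(" ".join(chunk))
--                 chunk = [words[k][3]]
--             else:
--                 chunk.append(words[k][3])
--             prev_top = top
--         lines.append(" ".join(chunk))
--         i = j
--     return lines
-- ===== Notes on version B (the rewrite author's own statement) =====
-- stated objective: alternative
-- what changed: Replaces A's single flat pass with Option sentinels (current_col/current_top) and end-of-loop flush by a nested two-stage traversal: after the same sort, scan contiguous column blocks, then chunk each block on top-gaps > 5 against the previous word; no sentinel state and no trailing-flush special case.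
import Mathlib
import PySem

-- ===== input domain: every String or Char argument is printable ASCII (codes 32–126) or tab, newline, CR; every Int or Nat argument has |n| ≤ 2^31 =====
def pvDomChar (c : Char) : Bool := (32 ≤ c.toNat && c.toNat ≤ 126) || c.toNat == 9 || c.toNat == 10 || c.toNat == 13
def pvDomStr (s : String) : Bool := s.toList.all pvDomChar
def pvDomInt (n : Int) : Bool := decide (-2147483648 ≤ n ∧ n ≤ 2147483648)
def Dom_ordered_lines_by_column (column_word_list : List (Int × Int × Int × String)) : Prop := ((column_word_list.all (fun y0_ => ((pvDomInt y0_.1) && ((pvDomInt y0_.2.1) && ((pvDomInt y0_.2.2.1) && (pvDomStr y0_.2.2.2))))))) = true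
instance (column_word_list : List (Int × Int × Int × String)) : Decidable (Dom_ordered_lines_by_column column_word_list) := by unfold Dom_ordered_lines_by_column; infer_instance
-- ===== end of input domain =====

-- B replaces A's flat sentinel-state pass by a nested column-block/top-chunk traversal (objective: alternative decomposition, same cost).

-- ===== PORT A =====
-- sorted(xs, key=lambda x: (x[0], x[1], x[2])): PySem.List.sorted has no 3-tuple key, so this is the
-- same stable insertion sort (PySem.List.sorted_eq_foldl_insertBy's shape) with the lexicographic
-- triple comparison written out — exact for Python's stable sort with a tuple key.
def pvTripleLT (a b : Int × Int × Int × String) : Bool :=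
  decide (a.1 < b.1) || (decide (a.1 = b.1) && (decide (a.2.1 < b.2.1) ||
    (decide (a.2.1 = b.2.1) && decide (a.2.2.1 < b.2.2.1))))

def pvSortTriple (xs : List (Int × Int × Int × String)) : List (Int × Int × Int × String) :=
  xs.foldl (fun acc x => PySem.List.insertBy pvTripleLT x acc) []

-- the loop's break condition, literally A's `current_col is not None and (col != current_col or (current_top is not None and abs(top - current_top) > 5))`
def pvFlush (c t : Int) (ocol otop : Option Int) : Bool :=
  match ocol with
  | none => false
  | some cc => decide (c ≠ cc) || (match otop with
    | none => false
    | some ct => decide (5 < |t - ct|))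

-- the for-loop of A, state = (lines, current_line, current_col, current_top)
def pvALoop : List (Int × Int × Int × String) → List String → List String → Option Int → Option Int → List String
  | [], lines, cur, _, _ => if cur ≠ [] then lines ++ [PySem.Str.join " " cur] else lines
  | (c, t, _, x) :: rest, lines, cur, ocol, otop =>
      if pvFlush c t ocol otop then
        if cur ≠ [] then pvALoop rest (lines ++ [PySem.Str.join " " cur]) [x] (some c) (some t)
        else pvALoop rest lines (cur ++ [x]) (some c) (some t)
      else pvALoop rest lines (cur ++ [x]) (some c) (some t)

def ordered_lines_by_column (column_word_list : List (Int × Int × Int × String)) : List String :=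
  if column_word_list = [] then []
  else pvALoop (pvSortTriple column_word_list) [] [] none none

-- ===== PORT B =====
-- inner loop of B: within one column block, chunk on |top - prev_top| > 5
def pvChunkCol : Int → List String → List (Int × Int × Int × String) → List String
  | _, cur, [] => [PySem.Str.join " " cur]
  | pt, cur, (_, t, _, x) :: r =>
      if decide (5 < |t - pt|) then PySem.Str.join " " cur :: pvChunkCol t [x] r
      else pvChunkCol t (cur ++ [x]) r

-- outer loop of B: advance over maximal runs of equal column index (the inner index scan j)
def pvGroupLoop : List (Int × Int × Int × String) → List String
  | [] => []
  | (c, t, _, x) :: r =>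
      pvChunkCol t [x] (r.takeWhile (fun w => w.1 == c)) ++ pvGroupLoop (r.dropWhile (fun w => w.1 == c))
termination_by l => l.length
decreasing_by
  simp only [List.length_cons]
  exact Nat.lt_succ_of_le (List.length_dropWhile_le _ _)

def ordered_lines_by_column_alt (column_word_list : List (Int × Int × Int × String)) : List String :=
  pvGroupLoop (pvSortTriple column_word_list)

-- ===== PRECONDITION & SPEC =====
def Spec_ordered_lines_by_column (column_word_list : List (Int × Int × Int × String)) (out : List String) : Prop := out = ordered_lines_by_column_alt column_word_list
instance (column_word_list : List (Int × Int × Int × String)) (out : List String) : Decidable (Spec_ordered_lines_by_column column_word_list out) := by unfold Spec_ordered_lines_by_column; infer_instance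

-- ===== CLAIM (what is proved, stated in full; the proofs are below) =====
def Claim_equal_ordered_lines_by_column : Prop := ∀ (column_word_list : List (Int × Int × Int × String)), Dom_ordered_lines_by_column column_word_list → Spec_ordered_lines_by_column column_word_list (ordered_lines_by_column column_word_list)

-- ===== LEMMAS AND PROOFS =====

-- equation lemmas for the well-founded pvGroupLoop
theorem pvGroupLoop_nil : pvGroupLoop [] = [] := by rw [pvGroupLoop.eq_def]

theorem pvGroupLoop_cons (c t lft : Int) (x : String) (r : List (Int × Int × Int × String)) :
    pvGroupLoop ((c, t, lft, x) :: r) =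
      pvChunkCol t [x] (r.takeWhile (fun w => w.1 == c)) ++ pvGroupLoop (r.dropWhile (fun w => w.1 == c)) := by
  rw [pvGroupLoop.eq_def]

-- A's loop only appends to `lines`: the accumulator factors out.
theorem pvALoop_lines (l : List (Int × Int × Int × String)) :
    ∀ lines cur oc ot, pvALoop l lines cur oc ot = lines ++ pvALoop l [] cur oc ot := by
  induction l with
  | nil =>
    intro lines cur oc ot
    by_cases hcur : cur = [] <;> simp [pvALoop, hcur]
  | cons w r ih =>
    obtain ⟨c, t, lft, x⟩ := w
    intro lines cur oc ot
    by_cases hf : pvFlush c t oc ot <;> by_cases hcur : cur = []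
    · simp only [pvALoop, hf, hcur, ite_true, ne_eq, not_true_eq_false, ite_false,
        List.nil_append]
      rw [ih]
    · simp only [pvALoop, hf, hcur, ne_eq, not_false_eq_true, ite_true, List.nil_append]
      rw [ih (lines ++ [PySem.Str.join " " cur]), ih [PySem.Str.join " " cur]]
      simp
    · simp only [pvALoop, hf, Bool.false_eq_true, ite_false]
      rw [ih]
    · simp only [pvALoop, hf, Bool.false_eq_true, ite_false]
      rw [ih]

-- Main invariant: from a running state (nonempty current line, its previous word's col/top),
-- A's flat loop produces exactly B's chunking of the current column run followed by the rest.
theorem pvALoop_eq_chunks (l : List (Int × Int × Int × String)) :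
    ∀ (cc t : Int) (cur : List String), cur ≠ [] →
      pvALoop l [] cur (some cc) (some t) =
        pvChunkCol t cur (l.takeWhile (fun w => w.1 == cc)) ++ pvGroupLoop (l.dropWhile (fun w => w.1 == cc)) := by
  induction l with
  | nil =>
    intro cc t cur hcur
    simp [pvALoop, pvChunkCol, pvGroupLoop_nil, hcur]
  | cons w r ih =>
    obtain ⟨c, t', lft, x⟩ := w
    intro cc t cur hcur
    by_cases hc : c = cc
    · subst hc
      by_cases hgap : 5 < |t' - t|
      · simp only [pvALoop, pvFlush, ne_eq, not_true_eq_false, decide_false, hgap, decide_true,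
          Bool.false_or, if_true, hcur, not_false_eq_true]
        rw [pvALoop_lines, ih c t' [x] (by simp)]
        simp [pvChunkCol, hgap, List.takeWhile, List.dropWhile]
      · simp only [pvALoop, pvFlush, ne_eq, not_true_eq_false, decide_false, hgap, Bool.false_or,
          Bool.false_eq_true, if_false]
        rw [ih c t' (cur ++ [x]) (by simp)]
        simp [pvChunkCol, hgap, List.takeWhile, List.dropWhile]
    · simp only [pvALoop, pvFlush, ne_eq, hc, not_false_eq_true, decide_true, Bool.true_or,
        if_true, hcur]
      rw [pvALoop_lines, ih c t' [x] (by simp)]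
      have hbeq : (c == cc) = false := by simp [hc]
      simp only [List.takeWhile, List.dropWhile, hbeq]
      simp [pvChunkCol, pvGroupLoop_cons]

-- ===== VERDICT (by name: the statement is the Claim_ definition above) =====
theorem ordered_lines_by_column_spec : Claim_equal_ordered_lines_by_column := by
  intro l _
  unfold Spec_ordered_lines_by_column ordered_lines_by_column ordered_lines_by_column_alt
  by_cases hl : l = []
  · simp [hl, pvSortTriple, pvGroupLoop_nil]
  · simp only [hl, ite_false]
    cases hs : pvSortTriple l with
    | nil => simp [pvALoop, pvGroupLoop_nil]
    | cons w rest =>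
      obtain ⟨c, t, lft, x⟩ := w
      simp only [pvALoop, pvFlush, List.nil_append, Bool.false_eq_true, if_false]
      rw [pvALoop_eq_chunks rest c t [x] (by simp), pvGroupLoop_cons]
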